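-- pv_equiv track=rewrite | github.com/DreDvil/SLOTH | start.py | parse_scanner_choice
-- ===== SOURCE A (Python) =====
-- from typing import Dict, List, Optional, Tuple
--
-- SCANNERS: List[Tuple[str, str, str]] = [
--     ("nmap_basic",  "Nmap (basic)",               "fast"),
--     ("nmap_vulners","Nmap (vuln/vulners)",         "medium"),
--     ("dirsearch",   "Dirsearch",                  "fast"),
--     ("subdomains",  "Subdomain enumeration",       "fast"),
--     ("dnsx",        "dnsx (DNS resolve)",          "fast"),
--     ("httpx",       "httpx (live host probe)",     "fast"),
--     ("whatweb",     "WhatWeb",                    "fast"),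
--     ("wafw00f",     "WAF detection",              "fast"),
--     ("sslscan",     "SSLScan (443)",              "fast"),
--     ("katana",      "Katana (JS crawler)",        "medium"),
--     ("testssl",     "testssl (deep TLS)",         "medium"),
--     ("nikto",       "Nikto (slow)",               "slow"),
--     ("nuclei",      "Nuclei (slow)",              "slow"),
--     ("dalfox",      "Dalfox XSS (slow)",          "slow"),
--     ("sqlmap",      "sqlmap SQLi (slow)",          "slow"),
--     ("all",         "ALL (recommended fast recon)","fast"),
-- ]
--
-- def parse_scanner_choice(s: str) -> List[str]:
--     s = s.strip()
--     if not s: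
--         return []
--     parts    = [p.strip() for p in s.split(",") if p.strip()]
--     all_keys = [x[0] for x in SCANNERS]
--     keys: List[str] = []
--     for p in parts:
--         if p.isdigit():
--             idx = int(p) - 1
--             if 0 <= idx < len(SCANNERS):
--                 keys.append(SCANNERS[idx][0])
--         else:
--             keys.append(p)
--     if "all" in keys:
--         return ["all"]
--     out: List[str] = []
--     for k in keys:
--         if k in all_keys and k != "all":
--             out.append(k)
--     seen: set = set(); res: List[str] = []
--     for k in out:
--         if k not in seen:
--             res.append(k); seen.add(k)
--     return res
-- ===== SOURCE B (Python) =====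
-- from typing import Dict, List, Optional, Tuple
--
-- SCANNERS: List[Tuple[str, str, str]] = [
--     ("nmap_basic",  "Nmap (basic)",               "fast"),
--     ("nmap_vulners","Nmap (vuln/vulners)",         "medium"),
--     ("dirsearch",   "Dirsearch",                  "fast"),
--     ("subdomains",  "Subdomain enumeration",       "fast"),
--     ("dnsx",        "dnsx (DNS resolve)",          "fast"),
--     ("httpx",       "httpx (live host probe)",     "fast"),
--     ("whatweb",     "WhatWeb",                    "fast"),
--     ("wafw00f",     "WAF detection",              "fast"),
--     ("sslscan",     "SSLScan (443)",              "fast"),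
--     ("katana",      "Katana (JS crawler)",        "medium"),
--     ("testssl",     "testssl (deep TLS)",         "medium"),
--     ("nikto",       "Nikto (slow)",               "slow"),
--     ("nuclei",      "Nuclei (slow)",              "slow"),
--     ("dalfox",      "Dalfox XSS (slow)",          "slow"),
--     ("sqlmap",      "sqlmap SQLi (slow)",          "slow"),
--     ("all",         "ALL (recommended fast recon)","fast"),
-- ]
--
-- VALID_KEYS = [x[0] for x in SCANNERS]
--
-- def parse_scanner_choice(s: str) -> List[str]:
--     seen: set = set()
--     res: List[str] = []
--     for raw in s.strip().split(","):
--         p = raw.strip()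
--         if not p:
--             continue
--         if p.isdigit():
--             idx = int(p) - 1
--             if not (0 <= idx < len(SCANNERS)):
--                 continue
--             key = SCANNERS[idx][0]
--         else:
--             key = p
--         if key == "all":
--             return ["all"]
--         if key in VALID_KEYS and key not in seen:
--             seen.add(key)
--             res.append(key)
--     return res
-- ===== Notes on version B (the rewrite author's own statement) =====
-- stated objective: simpler
-- what changed: Replaced A's four sequential passes (build keys, check for the all-selector, filter valid, dedup with a set) by one loop over the stripped comma-split parts that resolves each part, short-circuits on the all-selector, and threads a seen-set with the result list.
import Mathlib
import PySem

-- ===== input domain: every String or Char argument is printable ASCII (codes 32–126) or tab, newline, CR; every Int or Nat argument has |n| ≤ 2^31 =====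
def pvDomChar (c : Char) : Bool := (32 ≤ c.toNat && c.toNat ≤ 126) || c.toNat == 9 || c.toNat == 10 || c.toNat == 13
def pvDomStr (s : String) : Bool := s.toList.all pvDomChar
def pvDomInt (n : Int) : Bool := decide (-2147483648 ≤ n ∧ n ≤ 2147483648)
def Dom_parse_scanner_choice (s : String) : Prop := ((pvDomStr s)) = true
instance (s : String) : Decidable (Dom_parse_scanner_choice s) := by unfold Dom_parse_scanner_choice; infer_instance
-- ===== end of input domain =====

-- B replaces A's four sequential passes by one loop over the parts that threads a seen-set and the
-- result list, short-circuiting on the all-selector (objective: simpler).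

-- the module constant SCANNERS (shared by both Pythons)
def pvScanners : List (String × String × String) := [
  ("nmap_basic",  "Nmap (basic)",               "fast"),
  ("nmap_vulners","Nmap (vuln/vulners)",         "medium"),
  ("dirsearch",   "Dirsearch",                  "fast"),
  ("subdomains",  "Subdomain enumeration",       "fast"),
  ("dnsx",        "dnsx (DNS resolve)",          "fast"),
  ("httpx",       "httpx (live host probe)",     "fast"),
  ("whatweb",     "WhatWeb",                    "fast"),
  ("wafw00f",     "WAF detection",              "fast"),
  ("sslscan",     "SSLScan (443)",              "fast"),
  ("katana",      "Katana (JS crawler)",        "medium"),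
  ("testssl",     "testssl (deep TLS)",         "medium"),
  ("nikto",       "Nikto (slow)",               "slow"),
  ("nuclei",      "Nuclei (slow)",              "slow"),
  ("dalfox",      "Dalfox XSS (slow)",          "slow"),
  ("sqlmap",      "sqlmap SQLi (slow)",          "slow"),
  ("all",         "ALL (recommended fast recon)","fast")]

-- ===== PORT A =====
def parse_scanner_choice (s : String) : List String :=
  let s := PySem.Str.strip s
  if s = "" then []
  else
    let parts := ((PySem.Str.split? s ",").getD []).map PySem.Str.strip |>.filter (fun p => p ≠ "")
    let all_keys := pvScanners.map (fun x => x.1)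
    let keys := parts.foldl (fun keys p =>
      if PySem.Str.strIsdigit p then
        match PySem.Int.ofStr? p with
        | some n =>
          let idx := n - 1
          if 0 ≤ idx ∧ idx < (pvScanners.length : Int) then
            keys ++ [((PySem.List.pyGet? pvScanners idx).getD ("", "", "")).1]
          else keys
        | none => keys   -- unreachable: int(p) succeeds whenever p.isdigit()
      else keys ++ [p]) []
    if "all" ∈ keys then ["all"]
    else
      let out := keys.foldl (fun out k => if k ∈ all_keys ∧ k ≠ "all" then out ++ [k] else out) []
      (out.foldl (fun (acc : List String × PySem.Set String) k =>
          if acc.2.contains k then acc else (acc.1 ++ [k], PySem.Set.add acc.2 k)) ([], PySem.Set.empty)).1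

-- ===== PORT B =====
-- the module constant VALID_KEYS of Source B
def pvValidKeys : List String := pvScanners.map (fun x => x.1)

-- the loop of Source B: one pass over the raw comma-split parts, threading (seen, res)
def pvAltGo : List String → PySem.Set String → List String → List String
  | [], _, res => res
  | raw :: rest, seen, res =>
    let p := PySem.Str.strip raw
    if p = "" then pvAltGo rest seen res
    else
      let key? : Option String :=
        if PySem.Str.strIsdigit p then
          match PySem.Int.ofStr? p with
          | some n =>
            if 0 ≤ n - 1 ∧ n - 1 < (pvScanners.length : Int) then
              some (((PySem.List.pyGet? pvScanners (n - 1)).getD ("", "", "")).1)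
            else none   -- 'continue'
          | none => none
        else some p
      match key? with
      | none => pvAltGo rest seen res
      | some key =>
        if key = "all" then ["all"]
        else if key ∈ pvValidKeys ∧ ¬ (PySem.Set.contains seen key) then
          pvAltGo rest (PySem.Set.add seen key) (res ++ [key])
        else pvAltGo rest seen res

def parse_scanner_choice_alt (s : String) : List String :=
  pvAltGo ((PySem.Str.split? (PySem.Str.strip s) ",").getD []) PySem.Set.empty []

-- ===== PRECONDITION & SPEC =====
def Spec_parse_scanner_choice (s : String) (out : List String) : Prop := out = parse_scanner_choice_alt s
instance (s : String) (out : List String) : Decidable (Spec_parse_scanner_choice s out) := by unfold Spec_parse_scanner_choice; infer_instance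

-- ===== CLAIM (what is proved, stated in full; the proofs are below) =====
def Claim_equal_parse_scanner_choice : Prop := ∀ (s : String), Dom_parse_scanner_choice s → Spec_parse_scanner_choice s (parse_scanner_choice s)

-- ===== LEMMAS AND PROOFS =====

-- the key a part resolves to (none = part contributes nothing on the A side / is skipped on the B side)
def pvResolve (p : String) : Option String :=
  if PySem.Str.strIsdigit p then
    match PySem.Int.ofStr? p with
    | some n =>
      if 0 ≤ n - 1 ∧ n - 1 < (pvScanners.length : Int) then
        some (((PySem.List.pyGet? pvScanners (n - 1)).getD ("", "", "")).1)
      else none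
    | none => none
  else some p

-- A's keys-building loop, as a named step function (definitionally A's lambda)
def pvStepA (keys : List String) (p : String) : List String :=
  if PySem.Str.strIsdigit p then
    match PySem.Int.ofStr? p with
    | some n =>
      let idx := n - 1
      if 0 ≤ idx ∧ idx < (pvScanners.length : Int) then
        keys ++ [((PySem.List.pyGet? pvScanners idx).getD ("", "", "")).1]
      else keys
    | none => keys
  else keys ++ [p]

theorem pvStepA_eq (acc : List String) (p : String) :
    pvStepA acc p = acc ++ (pvResolve p).toList := by
  unfold pvStepA pvResolve
  by_cases hd : PySem.Str.strIsdigit p = true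
  · rw [if_pos hd, if_pos hd]
    cases PySem.Int.ofStr? p with
    | none => simp
    | some n =>
      dsimp only
      by_cases hr : 0 ≤ n - 1 ∧ n - 1 < (pvScanners.length : Int)
      · rw [if_pos hr, if_pos hr]; simp
      · rw [if_neg hr, if_neg hr]; simp
  · rw [if_neg hd, if_neg hd]; simp

-- A's keys-building loop is a filterMap of pvResolve
theorem pvKeysFold (parts acc : List String) :
    parts.foldl (fun keys p =>
      if PySem.Str.strIsdigit p then
        match PySem.Int.ofStr? p with
        | some n =>
          let idx := n - 1
          if 0 ≤ idx ∧ idx < (pvScanners.length : Int) then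
            keys ++ [((PySem.List.pyGet? pvScanners idx).getD ("", "", "")).1]
          else keys
        | none => keys
      else keys ++ [p]) acc = acc ++ parts.filterMap pvResolve := by
  show List.foldl pvStepA acc parts = acc ++ parts.filterMap pvResolve
  induction parts generalizing acc with
  | nil => simp
  | cons p rest ih =>
    rw [List.foldl_cons, pvStepA_eq, ih]
    cases hres : pvResolve p <;> simp [List.filterMap_cons, hres]

-- A's dedup loop, with seen = res (the invariant its (res, seen) pair maintains), is pvDedupFold
def pvDedupFold (res out : List String) : List String :=
  out.foldl (fun r k => if k ∈ r then r else r ++ [k]) res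

theorem pvDedupPair (out res : List String) :
    (out.foldl (fun (acc : List String × PySem.Set String) k =>
        if acc.2.contains k then acc else (acc.1 ++ [k], PySem.Set.add acc.2 k)) (res, res)).1
      = pvDedupFold res out := by
  induction out generalizing res with
  | nil => simp [pvDedupFold]
  | cons k rest ih =>
    simp only [List.foldl_cons, pvDedupFold]
    by_cases hm : k ∈ res
    · rw [if_pos (show PySem.Set.contains (res : PySem.Set String) k = true by
        simp [PySem.Set.contains, hm]), if_pos hm]
      exact ih res
    · have ha : PySem.Set.add (res : PySem.Set String) k = res ++ [k] := by
        simp [PySem.Set.add, PySem.Set.contains, hm]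
      rw [if_neg (show ¬ (PySem.Set.contains (res : PySem.Set String) k = true) by
        simp [PySem.Set.contains, hm]), if_neg hm, ha]
      exact ih (res ++ [k])

-- canonical form shared by the two pipelines
def pvKeysOf (raws : List String) : List String :=
  ((raws.map PySem.Str.strip).filter (fun p => p ≠ "")).filterMap pvResolve

def pvF (res keys : List String) : List String :=
  if "all" ∈ keys then ["all"]
  else pvDedupFold res (keys.filter (fun k => k ∈ pvValidKeys ∧ k ≠ "all"))

theorem pvKeysOf_cons_blank (raw : String) (rest : List String)
    (hp : PySem.Str.strip raw = "") : pvKeysOf (raw :: rest) = pvKeysOf rest := by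
  simp [pvKeysOf, hp]

theorem pvKeysOf_cons (raw : String) (rest : List String)
    (hp : ¬ PySem.Str.strip raw = "") :
    pvKeysOf (raw :: rest) = (pvResolve (PySem.Str.strip raw)).toList ++ pvKeysOf rest := by
  simp only [pvKeysOf, List.map_cons, List.filter_cons, ne_eq, hp, not_false_eq_true,
    decide_true, if_true, List.filterMap_cons]
  cases pvResolve (PySem.Str.strip raw) <;> simp

theorem pvF_all {keys : List String} (res : List String) (h : "all" ∈ keys) :
    pvF res keys = ["all"] := by
  simp [pvF, h]

theorem pvF_take {key : String} {res : List String} (keys : List String)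
    (hkv : key ∈ pvValidKeys) (hall : ¬ key = "all") (hkr : key ∉ res) :
    pvF res (key :: keys) = pvF (res ++ [key]) keys := by
  have hne : ¬ ("all" = key) := fun h => hall h.symm
  simp only [pvF, List.mem_cons, hne, false_or, List.filter_cons, hkv, hall, ne_eq,
    not_false_eq_true, and_self, decide_true, if_true, pvDedupFold, List.foldl_cons, hkr,
    if_neg, not_false_iff]

theorem pvF_skip {key : String} {res : List String} (keys : List String)
    (hall : ¬ key = "all") (h : key ∉ pvValidKeys ∨ key ∈ res) :
    pvF res (key :: keys) = pvF res keys := by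
  have hne : ¬ ("all" = key) := fun h => hall h.symm
  rcases h with h | h
  · simp [pvF, List.mem_cons, hne, List.filter_cons, h]
  · simp only [pvF, List.mem_cons, hne, false_or, List.filter_cons, pvDedupFold]
    split_ifs with ha hq
    · rfl
    · simp [h]
    · rfl

-- B's single pass computes the canonical form, for any accumulated res (with seen = res)
theorem pvGoSpec (raws : List String) (res : List String) :
    pvAltGo raws res res = pvF res (pvKeysOf raws) := by
  induction raws generalizing res with
  | nil => simp [pvAltGo, pvKeysOf, pvF, pvDedupFold]
  | cons raw rest ih =>
    rw [pvAltGo]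
    by_cases hp : PySem.Str.strip raw = ""
    · rw [pvKeysOf_cons_blank raw rest hp]
      simp only [hp, if_true]
      exact ih res
    · rw [pvKeysOf_cons raw rest hp]
      simp only [hp, if_false]
      rw [show (if PySem.Str.strIsdigit (PySem.Str.strip raw) then
          match PySem.Int.ofStr? (PySem.Str.strip raw) with
          | some n =>
            if 0 ≤ n - 1 ∧ n - 1 < (pvScanners.length : Int) then
              some (((PySem.List.pyGet? pvScanners (n - 1)).getD ("", "", "")).1)
            else none
          | none => none
        else some (PySem.Str.strip raw)) = pvResolve (PySem.Str.strip raw) from rfl]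
      cases hres : pvResolve (PySem.Str.strip raw) with
      | none =>
        simp only [Option.toList, List.nil_append]
        exact ih res
      | some key =>
        simp only [Option.toList, List.singleton_append]
        by_cases hall : key = "all"
        · rw [if_pos hall, hall]
          exact (pvF_all res (List.mem_cons_self)).symm
        · rw [if_neg hall]
          by_cases hkv : key ∈ pvValidKeys
          · by_cases hkr : key ∈ res
            · rw [if_neg (show ¬ (key ∈ pvValidKeys ∧ ¬ (PySem.Set.contains (res : PySem.Set String) key = true)) by
                  simp [PySem.Set.contains, hkr]),
                ih res, pvF_skip _ hall (Or.inr hkr)]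
            · rw [if_pos (show key ∈ pvValidKeys ∧ ¬ (PySem.Set.contains (res : PySem.Set String) key = true) by
                  simp [PySem.Set.contains, hkv, hkr]),
                show PySem.Set.add (res : PySem.Set String) key = res ++ [key] by
                  simp [PySem.Set.add, PySem.Set.contains, hkr],
                ih (res ++ [key]), pvF_take _ hkv hall hkr]
          · rw [if_neg (fun h => hkv h.1), ih res, pvF_skip _ hall (Or.inl hkv)]

-- ===== VERDICT (by name: the statement is the Claim_ definition above) =====
theorem parse_scanner_choice_spec : Claim_equal_parse_scanner_choice := by
  intro s _
  unfold Spec_parse_scanner_choice parse_scanner_choice parse_scanner_choice_alt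
  rw [show (PySem.Set.empty : PySem.Set String) = ([] : List String) from rfl]
  rw [pvGoSpec]
  by_cases h0 : PySem.Str.strip s = ""
  · rw [if_pos h0, h0]
    decide
  · rw [if_neg h0]
    dsimp only
    rw [pvKeysFold]
    rw [List.nil_append]
    rw [show (pvScanners.map (fun x => x.1)) = pvValidKeys from rfl]
    rw [PySem.List.foldl_append_ite_eq_filter]
    rw [List.nil_append]
    rw [pvDedupPair]
    rfl
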